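-- pv_equiv track=rewrite | github.com/greenspangle/LIN7077_Humanities | assignments/a3_collections_iteration/a3_answers.py | fiddledee_dict
-- ===== SOURCE A (Python) =====
-- def fiddledee_dict(an_int):
--     # first create the function fiddledee()
--     def fiddledee(another_int):
--         f_or_d_or_both = ''
--         if another_int % 3 == 0:
--             f_or_d_or_both += 'Fiddle'
--         if another_int % 2 == 0:
--             f_or_d_or_both += 'Dee'
--         if f_or_d_or_both == '':
--             return str(another_int)
--         return f_or_d_or_both
--
--     # create a dictionary
--     result = {}
--     # iterate across range adding integer as key and fiddledee as value
--     for i in range(1, an_int + 1):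
--         result[i] = fiddledee(i)
--     return result
-- ===== SOURCE B (Python) =====
-- # Period-6 FizzBuzz pattern: a fixed 6-entry label table indexed by i % 6,
-- # built once, replaces the per-element divisibility/string-concatenation helper.
-- _LABELS = ('FiddleDee', None, 'Dee', 'Fiddle', 'Dee', None)
--
-- def fiddledee_dict(an_int):
--     return {i: (_LABELS[i % 6] or str(i)) for i in range(1, an_int + 1)}
-- ===== Notes on version B (the rewrite author's own statement) =====
-- stated objective: alternative
-- what changed: Replaces the per-element divisibility tests and string concatenation with a fixed 6-entry label table indexed by i % 6 (the period-6 pattern), built once, in a dict comprehension.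
import Mathlib
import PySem

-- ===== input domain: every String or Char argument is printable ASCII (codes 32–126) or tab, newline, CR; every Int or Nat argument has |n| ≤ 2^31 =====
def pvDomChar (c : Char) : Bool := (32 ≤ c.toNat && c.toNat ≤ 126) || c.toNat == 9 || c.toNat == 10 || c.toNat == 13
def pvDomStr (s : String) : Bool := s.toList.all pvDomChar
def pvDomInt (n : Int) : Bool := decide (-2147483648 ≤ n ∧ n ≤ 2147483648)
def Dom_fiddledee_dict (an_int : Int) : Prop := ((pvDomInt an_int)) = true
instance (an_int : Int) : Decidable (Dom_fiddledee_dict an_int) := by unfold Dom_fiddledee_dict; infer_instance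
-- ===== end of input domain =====

-- B replaces A's per-element divisibility/concatenation helper by a fixed 6-entry
-- label table indexed by i % 6 (period-6 pattern); objective: alternative decomposition.

-- ===== PORT A =====
def fiddledee (another_int : Int) : String :=
  let f_or_d_or_both := ""
  let f_or_d_or_both :=
    if PySem.Int.mod another_int 3 == 0 then f_or_d_or_both ++ "Fiddle" else f_or_d_or_both
  let f_or_d_or_both :=
    if PySem.Int.mod another_int 2 == 0 then f_or_d_or_both ++ "Dee" else f_or_d_or_both
  if f_or_d_or_both == "" then PySem.Int.toStr another_int else f_or_d_or_both

def fiddledee_dict (an_int : Int) : List (Int × String) :=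
  ((PySem.List.pyRange 1 (an_int + 1) 1).foldl
    (fun (d : PySem.Dict Int String) i => d.insert i (fiddledee i)) PySem.Dict.empty).items

-- ===== PORT B =====
def pvLabels : List (Option String) :=
  [some "FiddleDee", none, some "Dee", some "Fiddle", some "Dee", none]

-- '_LABELS[i % 6] or str(i)': the index is always in range (0 ≤ i%6 < 6), so the
-- out-of-range arm of pyGet? is unreachable; 'x or y' with x a non-empty string or None.
def pvLabel (i : Int) : String :=
  match PySem.List.pyGet? pvLabels (PySem.Int.mod i 6) with
  | some (some s) => s
  | _ => PySem.Int.toStr i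

def fiddledee_dict_alt (an_int : Int) : List (Int × String) :=
  (PySem.List.pyRange 1 (an_int + 1) 1).map (fun i => (i, pvLabel i))

-- ===== PRECONDITION & SPEC =====
def Spec_fiddledee_dict (an_int : Int) (out : List (Int × String)) : Prop := out = fiddledee_dict_alt an_int
instance (an_int : Int) (out : List (Int × String)) : Decidable (Spec_fiddledee_dict an_int out) := by unfold Spec_fiddledee_dict; infer_instance

-- ===== CLAIM (what is proved, stated in full; the proofs are below) =====
def Claim_equal_fiddledee_dict : Prop := ∀ (an_int : Int), Dom_fiddledee_dict an_int → Spec_fiddledee_dict an_int (fiddledee_dict an_int)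

-- ===== LEMMAS AND PROOFS =====

-- Pointwise: A's helper agrees with B's table lookup, by case analysis on i % 6.
theorem fiddledee_eq_label (i : Int) : fiddledee i = pvLabel i := by
  have h3 : PySem.Int.mod i 3 = i % 3 := PySem.Int.mod_eq_emod_of_pos (by norm_num)
  have h2 : PySem.Int.mod i 2 = i % 2 := PySem.Int.mod_eq_emod_of_pos (by norm_num)
  have h6 : PySem.Int.mod i 6 = i % 6 := PySem.Int.mod_eq_emod_of_pos (by norm_num)
  have e3 : i % 3 = (i % 6) % 3 := (Int.emod_emod_of_dvd i (by norm_num)).symm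
  have e2 : i % 2 = (i % 6) % 2 := (Int.emod_emod_of_dvd i (by norm_num)).symm
  have hb : 0 ≤ i % 6 ∧ i % 6 < 6 := ⟨Int.emod_nonneg i (by norm_num), Int.emod_lt_of_pos i (by norm_num)⟩
  obtain ⟨h0, h5⟩ := hb
  unfold fiddledee pvLabel
  rw [h3, h2, h6, e3, e2]
  interval_cases h : i % 6 <;> simp [PySem.List.pyGet?, PySem.List.pyIdx?, pvLabels]

theorem fiddledee_dict_eq_alt (an_int : Int) : fiddledee_dict an_int = fiddledee_dict_alt an_int := by
  unfold fiddledee_dict fiddledee_dict_alt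
  rw [PySem.Dict.items_foldl_insert_fresh (k := fun i => i) (v := fiddledee)]
  · simp [funext fiddledee_eq_label, PySem.Dict.empty]
  · intro a _; exact PySem.Dict.contains_empty a
  · simpa using PySem.List.nodup_pyRange_one 1 (an_int + 1)

-- ===== VERDICT (by name: the statement is the Claim_ definition above) =====
theorem fiddledee_dict_spec : Claim_equal_fiddledee_dict := by
  intro an_int _
  unfold Spec_fiddledee_dict
  exact fiddledee_dict_eq_alt an_int
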